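-- pv_equiv track=rewrite | github.com/TerminalGambit/playground | automata/03tp.py | rechercheRK
-- ===== SOURCE A (Python) =====
-- def str2int(s):
--     return sum(ord(s[-i]) * 256 ** (i - 1) for i in range(1, len(s) + 1))
--
-- def hash(s):
--     return str2int(s) % 101
--
-- def rechercheRK(motif, texte):
--     hm = hash(motif)
--     lm = len(motif)
--     lt = len(texte)
--
--     for i in range(lt - lm + 1):
--         # Hash the current substring
--         h_text = hash(texte[i:i + lm])
--
--         # If the hash matches, compare the strings character by character
--         if h_text == hm:
--             if texte[i:i + lm] == motif:
--                 return i
--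
--     return -1
-- ===== SOURCE B (Python) =====
-- def rechercheRK(motif, texte):
--     lm = len(motif)
--     lt = len(texte)
--     if lm == 0:
--         return 0
--     if lm > lt:
--         return -1
--     q = 101
--     b = 256
--     hp = 0
--     for c in motif:
--         hp = (hp * b + ord(c)) % q
--     h = 0
--     for c in texte[:lm]:
--         h = (h * b + ord(c)) % q
--     pw = pow(b, lm - 1, q)
--     for i in range(lt - lm + 1):
--         if h == hp and texte[i:i + lm] == motif:
--             return i
--         if i + lm < lt:
--             h = ((h - ord(texte[i]) * pw) * b + ord(texte[i + lm])) % q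
--     return -1
-- ===== Notes on version B (the rewrite author's own statement) =====
-- stated objective: faster
-- what changed: A rehashes every window from scratch (and even computes the pattern value with per-character big powers); B is a true Rabin-Karp with an incrementally updated rolling hash and a precomputed modular power, O(n+m) hashing instead of O(n*m).
import Mathlib
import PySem

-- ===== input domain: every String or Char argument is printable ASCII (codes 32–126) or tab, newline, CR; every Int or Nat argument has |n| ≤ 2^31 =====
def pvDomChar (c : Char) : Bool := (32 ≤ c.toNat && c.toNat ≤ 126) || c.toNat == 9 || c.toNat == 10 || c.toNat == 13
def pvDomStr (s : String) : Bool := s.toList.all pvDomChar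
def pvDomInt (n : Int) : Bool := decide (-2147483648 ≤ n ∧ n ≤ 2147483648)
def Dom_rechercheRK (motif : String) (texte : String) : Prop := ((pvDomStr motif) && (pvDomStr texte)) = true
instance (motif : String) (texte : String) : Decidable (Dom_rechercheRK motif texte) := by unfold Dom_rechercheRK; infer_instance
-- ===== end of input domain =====

-- B replaces A's per-window from-scratch hashing by a true Rabin-Karp rolling hash (faster).

-- ===== PORT A =====
-- str2int(s) = sum(ord(s[-i]) * 256 ** (i - 1) for i in range(1, len(s) + 1))
-- s[-i] is always in range here (1 ≤ i ≤ len(s)), so the pyGetD default is never used;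
-- i - 1 ≥ 0, so the .toNat on the exponent is exact.
def str2intA (s : List Char) : Int :=
  (PySem.List.pyRange 1 ((s.length : Int) + 1) 1).foldl
    (fun acc i => acc + ((PySem.List.pyGetD s (-i) ' ').toNat : Int) * 256 ^ (i - 1).toNat) 0

-- hash(s) = str2int(s) % 101
def hashA (s : List Char) : Int := PySem.Int.mod (str2intA s) 101

-- the 'for i in range(lt - lm + 1)' loop of A, recursing over the index list
def loopA (m : List Char) (hm lm : Int) (t : List Char) : List Int → Int
  | [] => -1
  | i :: rest =>
      let sub := PySem.List.slice t (some i) (some (i + lm))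
      if hashA sub = hm then
        if sub = m then i else loopA m hm lm t rest
      else loopA m hm lm t rest

def rechercheRK (motif : String) (texte : String) : Int :=
  let m := motif.toList
  let t := texte.toList
  let hm := hashA m
  let lm : Int := m.length
  let lt : Int := t.length
  loopA m hm lm t (PySem.List.pyRange 0 (lt - lm + 1) 1)

-- ===== PORT B =====
-- hp/h accumulation loops of Source B: h = (h * 256 + ord(c)) % 101 over the characters
def hmodB (l : List Char) : Int :=
  l.foldl (fun h c => PySem.Int.mod (h * 256 + (c.toNat : Int)) 101) 0

-- the main loop of Source B, carrying the rolling hash h; indices are always in range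
-- (0 ≤ i, i + lm < lt = len t), so the pyGetD defaults are never used
def loopB (m : List Char) (hp lm lt : Int) (t : List Char) (pw : Int) : List Int → Int → Int
  | [], _ => -1
  | i :: rest, h =>
      if h = hp ∧ PySem.List.slice t (some i) (some (i + lm)) = m then i
      else
        let h' := if i + lm < lt then
            PySem.Int.mod ((h - ((PySem.List.pyGetD t i ' ').toNat : Int) * pw) * 256
                           + ((PySem.List.pyGetD t (i + lm) ' ').toNat : Int)) 101
          else h
        loopB m hp lm lt t pw rest h'

def rechercheRK_alt (motif : String) (texte : String) : Int :=
  let m := motif.toList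
  let t := texte.toList
  let lm : Int := m.length
  let lt : Int := t.length
  if lm = 0 then 0
  else if lm > lt then -1
  else
    let hp := hmodB m
    let h0 := hmodB (PySem.List.slice t none (some lm))
    -- pow(256, lm - 1, 101): modular power; lm ≥ 1 here so the .toNat is exact
    let pw := PySem.Int.mod (256 ^ (lm - 1).toNat) 101
    loopB m hp lm lt t pw (PySem.List.pyRange 0 (lt - lm + 1) 1) h0

-- ===== PRECONDITION & SPEC =====
def Spec_rechercheRK (motif : String) (texte : String) (out : Int) : Prop := out = rechercheRK_alt motif texte
instance (motif : String) (texte : String) (out : Int) : Decidable (Spec_rechercheRK motif texte out) := by unfold Spec_rechercheRK; infer_instance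

-- ===== CLAIM (what is proved, stated in full; the proofs are below) =====
def Claim_equal_rechercheRK : Prop := ∀ (motif : String) (texte : String), Dom_rechercheRK motif texte → Spec_rechercheRK motif texte (rechercheRK motif texte)

-- ===== LEMMAS AND PROOFS =====

-- reference loop: first index whose window equals the pattern
def refLoop (m : List Char) (lm : Int) (t : List Char) : List Int → Int
  | [] => -1
  | i :: rest =>
      if PySem.List.slice t (some i) (some (i + lm)) = m then i else refLoop m lm t rest

theorem loopA_eq_ref (m : List Char) (lm : Int) (t : List Char) (idxs : List Int) :
    loopA m (hashA m) lm t idxs = refLoop m lm t idxs := by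
  induction idxs with
  | nil => rfl
  | cons i rest ih =>
      simp only [loopA, refLoop]
      by_cases hs : PySem.List.slice t (some i) (some (i + lm)) = m
      · rw [hs]; simp
      · simp only [hs, if_false]
        split <;> simp [ih]

-- plain base-256 value (no mod); hmodB is this value mod 101
def valB (init : Int) (l : List Char) : Int :=
  l.foldl (fun h c => h * 256 + (c.toNat : Int)) init

theorem valB_shift (l : List Char) (a : Int) :
    valB a l = a * 256 ^ l.length + valB 0 l := by
  induction l generalizing a with
  | nil => simp [valB]
  | cons c l ih =>
      simp only [valB, List.foldl_cons, List.length_cons] at *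
      rw [ih (a * 256 + c.toNat), ih (0 * 256 + c.toNat)]
      ring

theorem valB_append_singleton (l : List Char) (c : Char) (a : Int) :
    valB a (l ++ [c]) = valB a l * 256 + c.toNat := by
  simp [valB]

theorem foldl_mod (l : List Char) (a : Int) :
    l.foldl (fun h c => PySem.Int.mod (h * 256 + (c.toNat : Int)) 101) (a % 101)
      = valB a l % 101 := by
  induction l generalizing a with
  | nil => simp [valB]
  | cons c l ih =>
      have hmod : PySem.Int.mod (a % 101 * 256 + (c.toNat : Int)) 101
          = (a * 256 + (c.toNat : Int)) % 101 := by
        rw [PySem.Int.mod_eq_emod_of_pos (by norm_num : (0:Int) < 101)]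
        have h1 : Int.ModEq 101 (a % 101) a := Int.emod_emod_of_dvd a (dvd_refl 101)
        exact (h1.mul_right 256).add_right _
      simp only [List.foldl_cons, hmod]
      have := ih (a * 256 + (c.toNat : Int))
      simpa [valB] using this

theorem hmodB_eq (l : List Char) : hmodB l = valB 0 l % 101 := by
  have := foldl_mod l 0
  simpa [hmodB] using this

-- window decomposition: for 0 ≤ i and i + lm < |t|, lm ≥ 1,
-- win i = t[i] :: mid and win (i+1) = mid ++ [t[i+lm]] with mid = take (lm-1) (drop (i+1) t)

-- the rolling-hash update is correct
theorem valB_cons (c : Char) (l : List Char) :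
    valB 0 (c :: l) = (c.toNat : Int) * 256 ^ l.length + valB 0 l := by
  simp only [valB, List.foldl_cons]
  have := valB_shift l (0 * 256 + (c.toNat : Int))
  simpa [valB] using this

theorem rolling (t : List Char) (i lm : Int) (hi : 0 ≤ i) (hlm : 1 ≤ lm)
    (hin : i + lm < (t.length : Int)) :
    PySem.Int.mod ((hmodB (PySem.List.slice t (some i) (some (i + lm)))
        - ((PySem.List.pyGetD t i ' ').toNat : Int) * PySem.Int.mod (256 ^ (lm - 1).toNat) 101) * 256
        + ((PySem.List.pyGetD t (i + lm) ' ').toNat : Int)) 101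
      = hmodB (PySem.List.slice t (some (i + 1)) (some (i + 1 + lm))) := by
  have hlt : i.toNat + lm.toNat < t.length := by omega
  have h4 : lm.toNat - 1 < (t.drop (i.toNat + 1)).length := by
    simp [List.length_drop]; omega
  have hwin : PySem.List.slice t (some i) (some (i + lm))
      = t[i.toNat]'(by omega) :: (t.drop (i.toNat + 1)).take (lm.toNat - 1) := by
    rw [PySem.List.slice_toNat t hi (by omega)]
    have h1 : (i + lm).toNat - i.toNat = lm.toNat := by omega
    rw [h1, List.drop_eq_getElem_cons (by omega)]
    have h2 : lm.toNat = (lm.toNat - 1) + 1 := by omega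
    rw [h2, List.take_succ_cons]
    simp
  have hidx : (t.drop (i.toNat + 1))[lm.toNat - 1]'h4 = t[i.toNat + lm.toNat]'hlt := by
    rw [List.getElem_drop]
    simp only [show i.toNat + 1 + (lm.toNat - 1) = i.toNat + lm.toNat from by omega]
  have hwin' : PySem.List.slice t (some (i + 1)) (some (i + 1 + lm))
      = (t.drop (i.toNat + 1)).take (lm.toNat - 1) ++ [t[i.toNat + lm.toNat]'hlt] := by
    rw [PySem.List.slice_toNat t (by omega) (by omega)]
    have h1 : (i + 1 + lm).toNat - (i + 1).toNat = lm.toNat := by omega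
    have h2 : (i + 1).toNat = i.toNat + 1 := by omega
    rw [h1, h2]
    have h3 : lm.toNat = (lm.toNat - 1) + 1 := by omega
    conv_lhs => rw [h3]
    rw [List.take_succ, List.getElem?_eq_getElem h4, hidx]
    simp
  have hlenmid : ((t.drop (i.toNat + 1)).take (lm.toNat - 1)).length = lm.toNat - 1 := by
    rw [List.length_take, List.length_drop]; omega
  have hgi : ((PySem.List.pyGetD t i ' ').toNat : Int) = ((t[i.toNat]'(by omega)).toNat : Int) := by
    rw [PySem.List.pyGetD_eq_getElem t ' ' hi (by omega)]
  have hgj : ((PySem.List.pyGetD t (i + lm) ' ').toNat : Int)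
      = ((t[i.toNat + lm.toNat]'hlt).toNat : Int) := by
    rw [PySem.List.pyGetD_eq_getElem t ' ' (by omega) (by omega)]
    simp only [show (i + lm).toNat = i.toNat + lm.toNat from by omega]
  set mid := (t.drop (i.toNat + 1)).take (lm.toNat - 1) with hmid
  set ci : Int := ((t[i.toNat]'(by omega)).toNat : Int)
  set cj : Int := ((t[i.toNat + lm.toNat]'hlt).toNat : Int)
  rw [hwin, hwin', hgi, hgj, hmodB_eq, hmodB_eq,
      PySem.Int.mod_eq_emod_of_pos (by norm_num : (0:Int) < 101),
      PySem.Int.mod_eq_emod_of_pos (by norm_num : (0:Int) < 101),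
      valB_cons, valB_append_singleton, hlenmid]
  have hexp : (lm - 1).toNat = lm.toNat - 1 := by omega
  rw [hexp]
  -- modular arithmetic
  have ha : Int.ModEq 101 ((ci * 256 ^ (lm.toNat - 1) + valB 0 mid) % 101)
      (ci * 256 ^ (lm.toNat - 1) + valB 0 mid) := Int.emod_emod_of_dvd _ (dvd_refl 101)
  have hb0 : Int.ModEq 101 (256 ^ (lm.toNat - 1) % 101) (256 ^ (lm.toNat - 1)) :=
    Int.emod_emod_of_dvd _ (dvd_refl 101)
  have hb : Int.ModEq 101 (ci * (256 ^ (lm.toNat - 1) % 101)) (ci * 256 ^ (lm.toNat - 1)) :=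
    Int.ModEq.mul_left ci hb0
  have h1 : Int.ModEq 101 ((ci * 256 ^ (lm.toNat - 1) + valB 0 mid) % 101
      - ci * (256 ^ (lm.toNat - 1) % 101)) (valB 0 mid) := by
    have := ha.sub hb
    simpa using this
  exact ((h1.mul_right 256).add_right cj)

-- the B loop computes the reference first-match when its hash state is the window hash
theorem loopB_eq_ref (m t : List Char) (lm : Int) (n : Nat) (a : Int)
    (ha : 0 ≤ a) (hlm : 1 ≤ lm)
    (hn : a + (n : Int) = (t.length : Int) - lm + 1) :
    loopB m (hmodB m) lm (t.length : Int) t (PySem.Int.mod (256 ^ (lm - 1).toNat) 101)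
        (PySem.List.pyRange a ((t.length : Int) - lm + 1) 1)
        (hmodB (PySem.List.slice t (some a) (some (a + lm))))
      = refLoop m lm t (PySem.List.pyRange a ((t.length : Int) - lm + 1) 1) := by
  induction n generalizing a with
  | zero =>
      rw [PySem.List.pyRange_one_eq_nil (by omega)]
      rfl
  | succ k ih =>
      rw [PySem.List.pyRange_one_cons (by omega)]
      simp only [loopB, refLoop]
      by_cases hs : PySem.List.slice t (some a) (some (a + lm)) = m
      · rw [hs]; simp
      · have hcond : ¬ (hmodB (PySem.List.slice t (some a) (some (a + lm))) = hmodB m ∧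
            PySem.List.slice t (some a) (some (a + lm)) = m) := by
          intro h; exact hs h.2
        rw [if_neg hcond, if_neg hs]
        cases k with
        | zero =>
            rw [PySem.List.pyRange_one_eq_nil (by omega)]
            rfl
        | succ k' =>
            have hupd : a + lm < (t.length : Int) := by omega
            rw [if_pos hupd, rolling t a lm ha hlm hupd]
            exact ih (a + 1) (by omega) (by omega)

-- the top-level equality on the list level
theorem main_eq (motif texte : String) : rechercheRK motif texte = rechercheRK_alt motif texte := by
  simp only [rechercheRK, rechercheRK_alt]
  by_cases h0 : (motif.toList.length : Int) = 0
  · have hm : motif.toList = [] := by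
      have : motif.toList.length = 0 := by exact_mod_cast h0
      exact List.length_eq_zero_iff.mp this
    rw [if_pos h0, hm]
    simp only [List.length_nil, Nat.cast_zero, sub_zero]
    rw [PySem.List.pyRange_one_cons (by omega : (0:Int) < (texte.toList.length : Int) + 1)]
    simp only [loopA]
    have hsub : PySem.List.slice texte.toList (some 0) (some (0 + 0)) = ([] : List Char) := by
      rw [show ((0:Int) + 0) = 0 from by ring, PySem.List.slice_toNat _ le_rfl le_rfl]; simp
    rw [hsub]
    simp
  · rw [if_neg h0]
    by_cases h1 : (motif.toList.length : Int) > (texte.toList.length : Int)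
    · rw [if_pos h1, PySem.List.pyRange_one_eq_nil (by omega)]
      rfl
    · rw [if_neg h1, loopA_eq_ref]
      have hinit : PySem.List.slice texte.toList none (some (motif.toList.length : Int))
          = PySem.List.slice texte.toList (some 0) (some ((0:Int) + motif.toList.length)) := by
        rw [zero_add, PySem.List.slice_to _ (by omega), PySem.List.slice_toNat _ le_rfl (by omega)]
        simp
      rw [hinit]
      exact (loopB_eq_ref motif.toList texte.toList (motif.toList.length)
        ((texte.toList.length : Int) - motif.toList.length + 1).toNat 0 le_rfl (by omega)
        (by omega)).symm

-- ===== VERDICT (by name: the statement is the Claim_ definition above) =====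
theorem rechercheRK_spec : Claim_equal_rechercheRK := by
  intro motif texte _
  unfold Spec_rechercheRK
  exact main_eq motif texte
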